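-- pv_equiv track=rewrite | github.com/AryanGanotra07/DSALGO | Graphs/wordBoard.py | check
-- ===== SOURCE A (Python) =====
-- def solve(A,i, j, m, n, B, k):
--     if i >= m or j >= n or i < 0 or j < 0 or A[i][j]!=B[k]:
--         return False
--     if k == len(B)-1:
--         return True
--
--
--     a = solve(A, i+1, j, m, n, B, k+1)
--     b = solve(A, i-1, j, m, n, B, k+1)
--     c = solve(A, i, j+1, m, n, B, k+1)
--     d = solve(A, i, j-1, m, n, B, k+1)
--
--     if a or b or c or d:
--         return True
--     return False
--
-- def check(A, B):
--     m = len(A)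
--     n = len(A[0])
--     k = len(B)
--     for i in range(m):
--         for j in range(n):
--             if A[i][j] == B[0]:
--                 if solve(A, i, j, m, n, B, 0):
--                     return True
--     return False
-- ===== SOURCE B (Python) =====
-- def check(A, B):
--     m, n = len(A), len(A[0])
--     cur = {(i, j) for i in range(m) for j in range(n) if A[i][j] == B[-1]}
--     for k in range(len(B) - 2, -1, -1):
--         cur = {(i, j) for i in range(m) for j in range(n)
--                if A[i][j] == B[k] and ((i + 1, j) in cur or (i - 1, j) in cur
--                                        or (i, j + 1) in cur or (i, j - 1) in cur)}
--     return bool(cur)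
-- ===== Notes on version B (the rewrite author's own statement) =====
-- stated objective: alternative
-- what changed: Replaced the 4-way DFS recursion from every matching start cell by a backward layer-by-layer reachable-position set DP over B's characters (no visited set is kept by A, so plain reachability is exact).
-- outside the precondition, e.g. on check([['a', 'b'], ['a']], 'a'): A returns True, B raises IndexError
import Mathlib
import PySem

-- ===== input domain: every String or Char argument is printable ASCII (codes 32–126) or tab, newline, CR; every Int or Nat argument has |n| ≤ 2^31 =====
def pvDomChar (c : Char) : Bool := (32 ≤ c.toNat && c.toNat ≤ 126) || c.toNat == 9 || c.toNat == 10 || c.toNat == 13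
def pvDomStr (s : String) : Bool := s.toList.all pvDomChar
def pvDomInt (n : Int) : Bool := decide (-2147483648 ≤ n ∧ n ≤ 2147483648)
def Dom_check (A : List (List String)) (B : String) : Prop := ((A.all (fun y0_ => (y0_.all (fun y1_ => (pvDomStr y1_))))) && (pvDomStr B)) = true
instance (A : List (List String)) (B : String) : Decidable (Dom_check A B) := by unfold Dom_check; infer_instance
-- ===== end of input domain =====

-- B replaces A's 4-way DFS recursion by a backward per-character reachable-position set DP: a different algorithm.

-- ===== PORT A =====
-- A[i][j] (only evaluated under the guards 0 ≤ i < m, 0 ≤ j < n; exact on Pre_'s row-length condition)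
def pvCell (A : List (List String)) (i j : Int) : String :=
  (PySem.List.pyGet? ((PySem.List.pyGet? A i).getD []) j).getD ""

-- literal port of `solve`; Python's k is always a nonnegative int here, so k : Nat; the dite on
-- k < Bl.length makes the indexing B[k] total, and the structural fuel counter (= len(B) - k,
-- which strictly decreases along Python's k+1 recursion) only makes the recursion total:
-- it never changes a computed value (every reachable call has 0 ≤ k < len(B), hence fuel > 0)
def solveAGo (A : List (List String)) (m n : Int) (Bl : List Char) :
    Nat → Int → Int → Nat → Bool
  | 0, _, _, _ => false
  | fuel+1, i, j, k =>
    if i ≥ m ∨ j ≥ n ∨ i < 0 ∨ j < 0 then false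
    else if h : k < Bl.length then
      if pvCell A i j ≠ String.ofList [Bl[k]] then false
      else if k = Bl.length - 1 then true
      else
        let a := solveAGo A m n Bl fuel (i+1) j (k+1)
        let b := solveAGo A m n Bl fuel (i-1) j (k+1)
        let c := solveAGo A m n Bl fuel i (j+1) (k+1)
        let d := solveAGo A m n Bl fuel i (j-1) (k+1)
        a || b || c || d
    else false

def solveA (A : List (List String)) (i j m n : Int) (Bl : List Char) (k : Nat) : Bool :=
  solveAGo A m n Bl (Bl.length - k) i j k

def check (A : List (List String)) (B : String) : Bool :=
  let m : Int := A.length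
  let n : Int := (A.headD []).length
  let Bl := B.toList
  (PySem.List.pyRange 0 m 1).any fun i =>
    (PySem.List.pyRange 0 n 1).any fun j =>
      (pvCell A i j == String.ofList [Bl.headD ' ']) && solveA A i j m n Bl 0

-- ===== PORT B =====
-- Source B's set comprehensions: the Python set of grid positions is represented as the
-- duplicate-free list of its elements in row-major order (only membership/emptiness are used)
def pvBase (A : List (List String)) (m n : Int) (c : Char) : List (Int × Int) :=
  (PySem.List.pyRange 0 m 1).flatMap fun i =>
    (PySem.List.pyRange 0 n 1).filterMap fun j =>
      if pvCell A i j = String.ofList [c] then some (i, j) else none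

def pvStep (A : List (List String)) (m n : Int) (c : Char) (cur : List (Int × Int)) :
    List (Int × Int) :=
  (PySem.List.pyRange 0 m 1).flatMap fun i =>
    (PySem.List.pyRange 0 n 1).filterMap fun j =>
      if pvCell A i j = String.ofList [c] ∧
          ((i+1, j) ∈ cur ∨ (i-1, j) ∈ cur ∨ (i, j+1) ∈ cur ∨ (i, j-1) ∈ cur) then
        some (i, j)
      else none

def check_alt (A : List (List String)) (B : String) : Bool :=
  let m : Int := A.length
  let n : Int := (A.headD []).length
  let Bl := B.toList
  match Bl.getLast? with
  | none => false          -- B == "" : Python raises (outside Pre_)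
  | some cl =>
    let init := pvBase A m n cl
    let final := (PySem.List.pyRange ((Bl.length : Int) - 2) (-1) (-1)).foldl
      (fun cur k => pvStep A m n ((PySem.List.pyGet? Bl k).getD ' ') cur) init
    !final.isEmpty

-- ===== PRECONDITION & SPEC =====
-- Pre_ excludes the empty grid and empty B (A raises IndexError) and grids with a row shorter
-- than the first row, on which both programs index past a row's end (A can return True early
-- before reaching the short row — see the cite — but generally raises IndexError).
def Pre_check (A : List (List String)) (B : String) : Prop :=
  A ≠ [] ∧ B.toList ≠ [] ∧ ∀ row ∈ A, (A.headD []).length ≤ row.length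
instance (A : List (List String)) (B : String) : Decidable (Pre_check A B) := by
  unfold Pre_check; infer_instance

def pvWitness_check : List (List String) × String := ([["a", "b"], ["b", "a"]], "ab")

def Spec_check (A : List (List String)) (B : String) (out : Bool) : Prop := out = check_alt A B
instance (A : List (List String)) (B : String) (out : Bool) : Decidable (Spec_check A B out) := by
  unfold Spec_check; infer_instance

-- ===== CLAIM (what is proved, stated in full; the proofs are below) =====
def Claim_equal_check : Prop :=
  ∀ (A : List (List String)) (B : String), Dom_check A B → Pre_check A B → Spec_check A B (check A B)

-- ===== LEMMAS AND PROOFS =====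

-- layer k of the backward DP, as a recursive definition (k counts down from len-1 in Source B)
def pvT (A : List (List String)) (m n : Int) (Bl : List Char) (k : Nat) : List (Int × Int) :=
  if h : k + 1 < Bl.length then pvStep A m n (Bl.getD k ' ') (pvT A m n Bl (k+1))
  else pvBase A m n (Bl.getD k ' ')
termination_by Bl.length - k
decreasing_by all_goals omega

theorem mem_pvBase {A : List (List String)} {m n : Int} {c : Char} {i j : Int} :
    (i, j) ∈ pvBase A m n c ↔
      (0 ≤ i ∧ i < m) ∧ (0 ≤ j ∧ j < n) ∧ pvCell A i j = String.ofList [c] := by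
  simp only [pvBase, List.mem_flatMap, List.mem_filterMap, PySem.List.mem_pyRange_one]
  constructor
  · rintro ⟨i', hi', j', hj', h⟩
    split at h
    · rename_i hc; cases h; exact ⟨hi', hj', hc⟩
    · cases h
  · rintro ⟨hi, hj, hc⟩
    exact ⟨i, hi, j, hj, by simp [hc]⟩

theorem mem_pvStep {A : List (List String)} {m n : Int} {c : Char}
    {cur : List (Int × Int)} {i j : Int} :
    (i, j) ∈ pvStep A m n c cur ↔
      (0 ≤ i ∧ i < m) ∧ (0 ≤ j ∧ j < n) ∧ pvCell A i j = String.ofList [c] ∧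
        ((i+1, j) ∈ cur ∨ (i-1, j) ∈ cur ∨ (i, j+1) ∈ cur ∨ (i, j-1) ∈ cur) := by
  simp only [pvStep, List.mem_flatMap, List.mem_filterMap, PySem.List.mem_pyRange_one]
  constructor
  · rintro ⟨i', hi', j', hj', h⟩
    split at h
    · rename_i hc; cases h; exact ⟨hi', hj', hc.1, hc.2⟩
    · cases h
  · rintro ⟨hi, hj, hc, hnb⟩
    exact ⟨i, hi, j, hj, by simp [hc, hnb]⟩

theorem mem_pvT_bounds {A : List (List String)} {m n : Int} {Bl : List Char} {k : Nat}
    {p : Int × Int} (h : p ∈ pvT A m n Bl k) :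
    (0 ≤ p.1 ∧ p.1 < m) ∧ (0 ≤ p.2 ∧ p.2 < n) := by
  obtain ⟨i, j⟩ := p
  rw [pvT] at h
  split at h
  · exact ⟨(mem_pvStep.mp h).1, (mem_pvStep.mp h).2.1⟩
  · exact ⟨(mem_pvBase.mp h).1, (mem_pvBase.mp h).2.1⟩

theorem solve_mem (A : List (List String)) (m n : Int) (Bl : List Char) :
    ∀ (f k : Nat), Bl.length - k = f → k < Bl.length → ∀ i j : Int,
      (solveAGo A m n Bl f i j k = true ↔ (i, j) ∈ pvT A m n Bl k) := by
  intro f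
  induction f with
  | zero => intro k hf hk i j; omega
  | succ f ih =>
    intro k hf hk i j
    have hget : Bl[k] = Bl.getD k ' ' := by
      rw [List.getD_eq_getElem?_getD, List.getElem?_eq_getElem hk]; rfl
    rw [solveAGo, pvT]
    by_cases hb : i ≥ m ∨ j ≥ n ∨ i < 0 ∨ j < 0
    · simp only [if_pos hb]
      constructor
      · intro h; cases h
      · intro h
        have := mem_pvT_bounds (k := k) (by rw [pvT]; exact h)
        simp at this; omega
    · simp only [if_neg hb, dif_pos hk]
      simp only [not_or, not_lt, not_le] at hb
      obtain ⟨h1, h2, h3, h4⟩ := hb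
      by_cases hlast : k + 1 < Bl.length
      · have hne : ¬ k = Bl.length - 1 := by omega
        simp only [dif_pos hlast, if_neg hne]
        rw [mem_pvStep, ← hget]
        have ihn := fun i j => ih (k+1) (by omega) hlast i j
        by_cases hc : pvCell A i j = String.ofList [Bl[k]]
        · simp only [hc, ← ihn, h1, h2, h3, h4]
          simp only [ne_eq, not_true_eq_false, if_false, Bool.or_eq_true, and_true, true_and]
          tauto
        · simp only [ne_eq, hc, not_false_eq_true, if_true]
          constructor
          · intro h; cases h
          · rintro ⟨_, _, hcc, _⟩; exact hcc.elim
      · have heq : k = Bl.length - 1 := by omega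
        simp only [dif_neg hlast, if_pos heq]
        rw [mem_pvBase, ← hget]
        by_cases hc : pvCell A i j = String.ofList [Bl[k]]
        · simp [hc, h1, h2, h3, h4]
        · simp [hc]

theorem fold_T (A : List (List String)) (m n : Int) (Bl : List Char) :
    ∀ k : Nat, k < Bl.length →
      (PySem.List.pyRange ((k : Int) - 1) (-1) (-1)).foldl
        (fun cur k' => pvStep A m n ((PySem.List.pyGet? Bl k').getD ' ') cur)
        (pvT A m n Bl k) = pvT A m n Bl 0 := by
  intro k
  induction k with
  | zero =>
    intro _
    rw [PySem.List.pyRange_neg_one_eq_nil (by omega), List.foldl_nil]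
  | succ k ih =>
    intro hk
    rw [show ((k + 1 : Nat) : Int) - 1 = (k : Int) by omega,
        PySem.List.pyRange_neg_one_cons (by omega), List.foldl_cons]
    have hget : (PySem.List.pyGet? Bl (k : Int)).getD ' ' = Bl.getD k ' ' := by
      rw [PySem.List.pyGet?_natCast, List.getElem?_eq_getElem (by omega),
          List.getD_eq_getElem?_getD, List.getElem?_eq_getElem (by omega)]
    have hstep : pvStep A m n ((PySem.List.pyGet? Bl (k : Int)).getD ' ')
        (pvT A m n Bl (k + 1)) = pvT A m n Bl k := by
      rw [hget]
      conv_rhs => rw [pvT]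
      rw [dif_pos hk]
    rw [hstep]
    exact ih (by omega)

theorem getLast?_eq_getD {Bl : List Char} (h : Bl ≠ []) :
    Bl.getLast? = some (Bl.getD (Bl.length - 1) ' ') := by
  have hl : Bl.length - 1 < Bl.length :=
    Nat.sub_lt (List.length_pos_iff.mpr h) one_pos
  rw [List.getLast?_eq_getElem?, List.getElem?_eq_getElem hl,
      List.getD_eq_getElem?_getD, List.getElem?_eq_getElem hl]
  rfl

theorem headD_eq_getD {Bl : List Char} : Bl.headD ' ' = Bl.getD 0 ' ' := by
  cases Bl <;> rfl

-- ===== VERDICT (by name: the statement is the Claim_ definition above) =====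
theorem check_spec : Claim_equal_check := by
  intro A B _ hpre
  unfold Spec_check check check_alt
  obtain ⟨-, hB, -⟩ := hpre
  set m : Int := (A.length : Int) with hm
  set n : Int := ((A.headD []).length : Int) with hn
  set Bl := B.toList with hBl
  have hL : 0 < Bl.length := List.length_pos_iff.mpr hB
  dsimp only
  rw [getLast?_eq_getD hB]
  -- the fold in check_alt computes pvT 0
  have hbase : pvBase A m n (Bl.getD (Bl.length - 1) ' ') = pvT A m n Bl (Bl.length - 1) := by
    rw [pvT, dif_neg (by omega)]
  have hrange : ((Bl.length : Int) - 2) = ((Bl.length - 1 : Nat) : Int) - 1 := by omega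
  have hfold := fold_T A m n Bl (Bl.length - 1) (by omega)
  rw [hrange]
  dsimp only
  rw [hbase, hfold]
  -- both sides are "pvT 0 is nonempty"
  rw [Bool.eq_iff_iff]
  simp only [Bool.not_eq_true', List.isEmpty_eq_false_iff_exists_mem, List.any_eq_true,
    PySem.List.mem_pyRange_one, Bool.and_eq_true, beq_iff_eq]
  constructor
  · rintro ⟨i, hi, j, hj, -, hs⟩
    exact ⟨(i, j), (solve_mem A m n Bl _ 0 rfl hL i j).mp (by rw [solveA] at hs; exact hs)⟩
  · rintro ⟨⟨i, j⟩, hp⟩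
    have hb := mem_pvT_bounds hp
    have hs : solveA A i j m n Bl 0 = true := by
      rw [solveA]
      exact (solve_mem A m n Bl _ 0 rfl hL i j).mpr hp
    refine ⟨i, hb.1, j, hb.2, ?_, hs⟩
    have hc : pvCell A i j = String.ofList [Bl.getD 0 ' '] := by
      rw [pvT] at hp
      split at hp
      · exact (mem_pvStep.mp hp).2.2.1
      · exact (mem_pvBase.mp hp).2.2
    rw [headD_eq_getD]
    exact hc
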